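-- pv_equiv track=rewrite | github.com/gentritbiba/euler | Python/p239.py | derangement
-- ===== SOURCE A (Python) =====
-- import math
--
-- def derangement(n,r):
--     if( n < 1 ):
--         return math.factorial(r)
--     n = n - 1
--     result = r * derangement( n , r )
--     if n>0:
--         result+= n * derangement( n-1 , r + 1)
--     return result
-- ===== SOURCE B (Python) =====
-- import math
--
-- def derangement(n, r):
--     # Bottom-up DP over rows m = -1..n (row m holds f(m, r+k) for shifting k);
--     # replaces A's exponential double recursion with O(n^2) table filling.
--     if n < 1:
--         return math.factorial(r)
--     prev2 = [math.factorial(r + k) for k in range(n + 4)]   # row m-2 (starts as base row)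
--     prev1 = prev2[:n + 3]                                   # row m-1 (starts as base row)
--     for m in range(1, n + 1):
--         cur = [(r + k) * prev1[k] + ((m - 1) * prev2[k + 1] if m > 1 else 0)
--                for k in range(n + 2 - m)]
--         prev2, prev1 = prev1, cur
--     return prev1[0]
-- ===== Notes on version B (the rewrite author's own statement) =====
-- stated objective: faster
-- what changed: Replaced A's exponential double recursion with a bottom-up O(n^2) dynamic program that fills shifting rows f(m, r+k) from the factorial base row.
import Mathlib
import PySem

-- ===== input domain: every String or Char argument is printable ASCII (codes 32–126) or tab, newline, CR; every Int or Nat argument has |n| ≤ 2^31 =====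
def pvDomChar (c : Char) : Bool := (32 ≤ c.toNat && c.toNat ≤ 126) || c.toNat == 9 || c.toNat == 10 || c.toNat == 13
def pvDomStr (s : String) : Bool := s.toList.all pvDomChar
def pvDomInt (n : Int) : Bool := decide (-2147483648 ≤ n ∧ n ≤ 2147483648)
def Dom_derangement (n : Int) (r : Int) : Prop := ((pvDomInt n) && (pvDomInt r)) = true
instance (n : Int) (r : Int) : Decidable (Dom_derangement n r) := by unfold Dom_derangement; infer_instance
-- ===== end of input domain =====

-- B replaces A's exponential double recursion with a bottom-up O(n^2) row DP; return values agree for all r ≥ 0.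

-- math.factorial, exact for r ≥ 0 (Pre_ excludes r < 0, where Python raises ValueError)
def pyFactorial (r : Int) : Int := (Nat.factorial r.toNat : Int)

-- ===== PORT A =====
def derangement (n : Int) (r : Int) : Int :=
  if n < 1 then pyFactorial r
  else
    r * derangement (n - 1) r +
      (if n - 1 > 0 then (n - 1) * derangement (n - 1 - 1) (r + 1) else 0)
termination_by n.toNat
decreasing_by all_goals omega

-- ===== PORT B =====
def derangement_alt (n : Int) (r : Int) : Int :=
  if n < 1 then pyFactorial r
  else
    let N := n.toNat
    let prev2 := (List.range (N + 4)).map (fun (k : Nat) => pyFactorial (r + (k : Int)))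
    let prev1 := prev2.take (N + 3)
    let res := (List.range N).foldl
      (fun (st : List Int × List Int) i =>
        let m := i + 1
        let cur := (List.range (N + 2 - m)).map (fun (k : Nat) =>
          (r + (k : Int)) * st.2.getD k 0 +
            (if m > 1 then ((m : Int) - 1) * st.1.getD (k + 1) 0 else 0))
        (st.2, cur))
      (prev2, prev1)
    res.2.getD 0 0

-- ===== PRECONDITION & SPEC =====
-- Pre_ excludes r < 0, on which Python's math.factorial raises ValueError in both programs.
def Pre_derangement (n : Int) (r : Int) : Prop := 0 ≤ r
instance (n : Int) (r : Int) : Decidable (Pre_derangement n r) := by unfold Pre_derangement; infer_instance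
def pvWitness_derangement : Int × Int := (3, 2)

def Spec_derangement (n : Int) (r : Int) (out : Int) : Prop := out = derangement_alt n r
instance (n : Int) (r : Int) (out : Int) : Decidable (Spec_derangement n r out) := by unfold Spec_derangement; infer_instance

-- ===== CLAIM (what is proved, stated in full; the proofs are below) =====
def Claim_equal_derangement : Prop := ∀ (n : Int) (r : Int), Dom_derangement n r → Pre_derangement n r → Spec_derangement n r (derangement n r)

-- ===== LEMMAS AND PROOFS =====

-- the common mathematical recurrence both programs compute
def pvD : Nat → Int → Int
  | 0, s => pyFactorial s
  | 1, s => s * pvD 0 s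
  | (m + 2), s => s * pvD (m + 1) s + ((m : Int) + 1) * pvD m (s + 1)

lemma derangement_eq_pvD (n r : Int) : derangement n r = pvD n.toNat r := by
  by_cases h1 : n < 1
  · rw [derangement]
    simp only [h1, if_true]
    have : n.toNat = 0 := by omega
    rw [this, pvD]
  · have hlt : (n - 1).toNat < n.toNat := by omega
    have hlt2 : (n - 1 - 1).toNat < n.toNat := by omega
    have ih1 := derangement_eq_pvD (n - 1) r
    have ih2 := derangement_eq_pvD (n - 1 - 1) (r + 1)
    rw [derangement]
    simp only [h1, if_false]
    rw [ih1, ih2]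
    by_cases h2 : n - 1 > 0
    · -- n ≥ 2
      obtain ⟨m, hm⟩ : ∃ m : Nat, n.toNat = m + 2 := ⟨n.toNat - 2, by omega⟩
      have e1 : (n - 1).toNat = m + 1 := by omega
      have e2 : (n - 1 - 1).toNat = m := by omega
      have e3 : n - 1 = ((m : Int) + 1) := by omega
      rw [if_pos h2, e1, e2, e3, hm]
      have hd : pvD (m + 2) r = r * pvD (m + 1) r + ((m : Int) + 1) * pvD m (r + 1) := rfl
      rw [hd]
    · -- n = 1
      have hn : n = 1 := by omega
      simp only [h2, if_false, hn]
      norm_num [pvD]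
termination_by n.toNat

-- a DP row: values pvD j (r+k) for k < len
def pvRow (r : Int) (j len : Nat) : List Int := (List.range len).map (fun (k : Nat) => pvD j (r + (k : Int)))

lemma pvRow_getD (r : Int) (j len k : Nat) (h : k < len) :
    (pvRow r j len).getD k 0 = pvD j (r + k) := by
  simp [pvRow, List.getD, List.getElem?_map, List.getElem?_range, h]

-- state of B's fold after i steps
def pvState (r : Int) (N : Nat) : Nat → List Int × List Int
  | 0 => (pvRow r 0 (N + 4), pvRow r 0 (N + 3))
  | 1 => (pvRow r 0 (N + 3), pvRow r 1 (N + 1))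
  | (i + 2) => (pvRow r (i + 1) (N + 1 - i), pvRow r (i + 2) (N - i))

lemma pvState_snd (r : Int) (N i : Nat) (h : 1 ≤ i) :
    (pvState r N i).2 = pvRow r i (N + 2 - i) := by
  match i, h with
  | 1, _ => simp only [pvState]; rfl
  | (j + 2), _ =>
    rw [show N + 2 - (j + 2) = N - j from by omega]
    simp only [pvState]

lemma pvState_fst_getD (r : Int) (N i k : Nat) (h : 1 ≤ i) (hk : k < N + 2 - i) :
    (pvState r N i).1.getD k 0 = pvD (i - 1) (r + (k : Int)) := by
  match i, h with
  | 1, _ =>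
    simp only [pvState]
    rw [pvRow_getD r 0 (N + 3) k (by omega)]
  | (j + 2), _ =>
    simp only [pvState]
    rw [pvRow_getD r (j + 1) (N + 1 - j) k (by omega)]
    norm_num

lemma pvState_foldl (r : Int) (N : Nat) (i : Nat) (hi : i ≤ N) :
    (List.range i).foldl
      (fun (st : List Int × List Int) i =>
        let m := i + 1
        let cur := (List.range (N + 2 - m)).map (fun (k : Nat) =>
          (r + (k : Int)) * st.2.getD k 0 +
            (if m > 1 then ((m : Int) - 1) * st.1.getD (k + 1) 0 else 0))
        (st.2, cur))
      (pvRow r 0 (N + 4), pvRow r 0 (N + 3)) = pvState r N i := by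
  induction i with
  | zero => rfl
  | succ i ih =>
    rw [List.range_succ, List.foldl_append, ih (by omega)]
    simp only [List.foldl_cons, List.foldl_nil]
    cases i with
    | zero =>
      simp only [pvState]
      refine Prod.ext rfl ?_
      apply List.ext_getElem
      · simp [pvRow]
      intro k hk1 hk2
      have hk' : k < N + 1 := by simpa [pvRow] using hk2
      have hrhs : (pvRow r 1 (N + 1))[k] = pvD 1 (r + (k : Int)) := by simp [pvRow]
      simp only [List.getElem_map, List.getElem_range]
      rw [pvRow_getD r 0 (N + 3) k (by omega)]
      rw [if_neg (by omega : ¬ ((0 : Nat) + 1 > 1))]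
      rw [hrhs]
      have h1 : pvD 1 (r + (k : Int)) = (r + (k : Int)) * pvD 0 (r + k) := rfl
      rw [h1]
      ring
    | succ j =>
      refine Prod.ext ?_ ?_
      · have h2 : (pvState r N (j + 1 + 1)).1 = pvRow r (j + 1) (N + 1 - j) := by
          show (pvState r N (j + 2)).1 = _
          simp only [pvState]
        show (pvState r N (j + 1)).2 = (pvState r N (j + 1 + 1)).1
        have e : N + 2 - (j + 1) = N + 1 - j := by omega
        rw [h2, pvState_snd r N (j + 1) (by omega), e]
      · have hsnd2 : (pvState r N (j + 1 + 1)).2 = pvRow r (j + 2) (N - j) := by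
          show (pvState r N (j + 2)).2 = _
          simp only [pvState]
        rw [hsnd2]
        apply List.ext_getElem
        · simp only [List.length_map, List.length_range, pvRow]
          omega
        intro k hk1 hk2
        have hk' : k < N - j := by simpa [pvRow] using hk2
        simp only [List.getElem_map, List.getElem_range]
        rw [pvState_snd r N (j + 1) (by omega), pvRow_getD r (j + 1) (N + 2 - (j + 1)) k (by omega)]
        rw [pvState_fst_getD r N (j + 1) (k + 1) (by omega) (by omega)]
        rw [if_pos (by omega : j + 1 + 1 > 1)]
        have hrhs : (pvRow r (j + 2) (N - j))[k] = pvD (j + 2) (r + (k : Int)) := by simp [pvRow]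
        rw [hrhs]
        have hrec : pvD (j + 2) (r + (k : Int)) =
            (r + (k : Int)) * pvD (j + 1) (r + k) + ((j : Int) + 1) * pvD j (r + k + 1) := rfl
        rw [hrec]
        push_cast
        ring_nf

lemma derangement_alt_eq_pvD (n r : Int) : derangement_alt n r = pvD n.toNat r := by
  by_cases h1 : n < 1
  · have : n.toNat = 0 := by omega
    rw [derangement_alt]
    simp only [h1, if_true, this, pvD]
  · rw [derangement_alt]
    simp only [h1, if_false]
    obtain ⟨M, hM⟩ : ∃ M : Nat, n.toNat = M + 1 := ⟨n.toNat - 1, by omega⟩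
    have hinit : (List.range (n.toNat + 4)).map (fun (k : Nat) => pyFactorial (r + (k : Int))) = pvRow r 0 (n.toNat + 4) := by
      simp [pvRow, pvD]
    have htake : (pvRow r 0 (n.toNat + 4)).take (n.toNat + 3) = pvRow r 0 (n.toNat + 3) := by
      unfold pvRow
      rw [← List.map_take, List.take_range, Nat.min_eq_left (by omega : n.toNat + 3 ≤ n.toNat + 4)]
    simp only [hinit, htake]
    rw [pvState_foldl r n.toNat n.toNat (le_refl _), hM]
    rw [pvState_snd r (M + 1) (M + 1) (by omega)]
    rw [pvRow_getD r (M + 1) (M + 1 + 2 - (M + 1)) 0 (by omega)]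
    norm_num

-- ===== VERDICT (by name: the statement is the Claim_ definition above) =====
theorem derangement_spec : Claim_equal_derangement := by
  intro n r _ _
  unfold Spec_derangement
  rw [derangement_eq_pvD, derangement_alt_eq_pvD]
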